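-- pv_equiv track=rewrite | github.com/h3manthh/Automatic-Form-Filling-using-GPT- | generate_answers.py | filter_text_by_keywords
-- ===== SOURCE A (Python) =====
-- def filter_text_by_keywords(extracted_text):
--     keywords = [line.split(':', 1)[0] for line in extracted_text.split('\n') if ':' in line]  # using :
--     keywords_Q = [line.split('?', 1)[0] for line in extracted_text.split('\n') if '?' in line]  # using ?
--     keywords_D = [line.split('.', 1)[0] for line in extracted_text.split('\n') if '.' in line]  # using .
--     formatted_keywords = {f'"{keyword}"': None for keyword in keywords}
--     formatted_keywords_Q = {f'"{keyword}"': None for keyword in keywords_Q}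
--     formatted_keywords_D = {f'"{keyword}"': None for keyword in keywords_D}
--     return formatted_keywords, formatted_keywords_Q, formatted_keywords_D
-- ===== SOURCE B (Python) =====
-- def filter_text_by_keywords(extracted_text):
--     d1, d2, d3 = {}, {}, {}
--     pre = ''
--     p1 = p2 = p3 = None
--     for ch in extracted_text + '\n':
--         if ch == '\n':
--             if p1 is not None:
--                 d1[f'"{p1}"'] = None
--             if p2 is not None:
--                 d2[f'"{p2}"'] = None
--             if p3 is not None:
--                 d3[f'"{p3}"'] = None
--             pre = ''
--             p1 = p2 = p3 = None
--         else:
--             if ch == ':' and p1 is None: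
--                 p1 = pre
--             elif ch == '?' and p2 is None:
--                 p2 = pre
--             elif ch == '.' and p3 is None:
--                 p3 = pre
--             pre += ch
--     return d1, d2, d3
-- ===== Notes on version B (the rewrite author's own statement) =====
-- stated objective: alternative
-- what changed: Replaces A's newline split plus three per-separator scans (substring membership test, split(sep,1) and a dict comprehension each) with a single character-level state machine over the text that buffers the current line prefix, captures the prefix at the first occurrence of each separator, and commits to the three dicts at each line boundary.
import Mathlib
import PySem

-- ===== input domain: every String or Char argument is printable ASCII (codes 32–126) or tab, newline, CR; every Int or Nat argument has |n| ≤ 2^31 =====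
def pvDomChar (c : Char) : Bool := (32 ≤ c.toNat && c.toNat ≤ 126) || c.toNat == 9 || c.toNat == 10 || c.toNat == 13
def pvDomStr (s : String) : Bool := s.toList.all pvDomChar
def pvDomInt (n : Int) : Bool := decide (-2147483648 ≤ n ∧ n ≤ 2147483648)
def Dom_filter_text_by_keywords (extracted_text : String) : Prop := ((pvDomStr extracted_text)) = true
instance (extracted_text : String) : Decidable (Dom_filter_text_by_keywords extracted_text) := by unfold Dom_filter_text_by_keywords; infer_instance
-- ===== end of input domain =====

-- B replaces A's newline-split plus three per-separator scans with one character-level state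
-- machine over the text that captures each separator's first-occurrence prefix per line
-- and commits all three dicts at each newline (objective: alternative).


abbrev pvD := PySem.Dict String (Option String)

-- ===== PORT A =====
-- line.split(sep, 1)[0]  (sep nonempty so splitMax? is some; the split list is never empty)
def pvSplitHead (line sep : String) : String :=
  ((PySem.Str.splitMax? line sep 1).getD []).getD 0 ""

def filter_text_by_keywords (extracted_text : String) : (List (String × Option String)) × (List (String × Option String)) × (List (String × Option String)) :=
  let lines := (PySem.Str.split? extracted_text "\n").getD []
  let keywords := (lines.filter (fun l => PySem.Str.isIn ":" l)).map (fun l => pvSplitHead l ":")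
  let keywords_Q := (lines.filter (fun l => PySem.Str.isIn "?" l)).map (fun l => pvSplitHead l "?")
  let keywords_D := (lines.filter (fun l => PySem.Str.isIn "." l)).map (fun l => pvSplitHead l ".")
  let formatted_keywords := keywords.foldl (fun (d : pvD) k => d.insert ("\"" ++ k ++ "\"") none) PySem.Dict.empty
  let formatted_keywords_Q := keywords_Q.foldl (fun (d : pvD) k => d.insert ("\"" ++ k ++ "\"") none) PySem.Dict.empty
  let formatted_keywords_D := keywords_D.foldl (fun (d : pvD) k => d.insert ("\"" ++ k ++ "\"") none) PySem.Dict.empty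
  (formatted_keywords.items, formatted_keywords_Q.items, formatted_keywords_D.items)

-- ===== PORT B =====
-- state: three dicts, the buffered prefix of the current line, and the captured
-- prefix before the first ':', '?', '.' of the current line (none = not seen yet)
abbrev pvSt := (pvD × pvD × pvD) × (List Char × Option (List Char) × Option (List Char) × Option (List Char))

def pvStepB (s : pvSt) (ch : Char) : pvSt :=
  let ds := s.1
  let pre := s.2.1
  let p1 := s.2.2.1
  let p2 := s.2.2.2.1
  let p3 := s.2.2.2.2
  if ch = '\n' then
    let d1 := match p1 with | some p => ds.1.insert ("\"" ++ String.ofList p ++ "\"") none | none => ds.1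
    let d2 := match p2 with | some p => ds.2.1.insert ("\"" ++ String.ofList p ++ "\"") none | none => ds.2.1
    let d3 := match p3 with | some p => ds.2.2.insert ("\"" ++ String.ofList p ++ "\"") none | none => ds.2.2
    ((d1, d2, d3), ([], none, none, none))
  else
    let ps : Option (List Char) × Option (List Char) × Option (List Char) :=
      if ch = ':' ∧ p1 = none then (some pre, p2, p3)
      else if ch = '?' ∧ p2 = none then (p1, some pre, p3)
      else if ch = '.' ∧ p3 = none then (p1, p2, some pre)
      else (p1, p2, p3)
    (ds, (pre ++ [ch], ps.1, ps.2.1, ps.2.2))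

def filter_text_by_keywords_alt (extracted_text : String) : (List (String × Option String)) × (List (String × Option String)) × (List (String × Option String)) :=
  let s := (extracted_text.toList ++ ['\n']).foldl pvStepB
    ((PySem.Dict.empty, PySem.Dict.empty, PySem.Dict.empty), ([], none, none, none))
  (s.1.1.items, s.1.2.1.items, s.1.2.2.items)

-- ===== PRECONDITION & SPEC =====
def Spec_filter_text_by_keywords (extracted_text : String) (out : (List (String × Option String)) × (List (String × Option String)) × (List (String × Option String))) : Prop := out = filter_text_by_keywords_alt extracted_text
instance (extracted_text : String) (out : (List (String × Option String)) × (List (String × Option String)) × (List (String × Option String))) : Decidable (Spec_filter_text_by_keywords extracted_text out) := by unfold Spec_filter_text_by_keywords; infer_instance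

-- ===== CLAIM (what is proved, stated in full; the proofs are below) =====
def Claim_equal_filter_text_by_keywords : Prop := ∀ (extracted_text : String), Dom_filter_text_by_keywords extracted_text → Spec_filter_text_by_keywords extracted_text (filter_text_by_keywords extracted_text)

-- ===== LEMMAS AND PROOFS =====

-- the list of lines of cs split at '\n', by structural recursion on the characters
def pvLines : List Char → List (List Char)
  | [] => [[]]
  | c :: rest =>
      if c = '\n' then [] :: pvLines rest
      else match pvLines rest with
        | [] => [[c]]
        | h :: t => (c :: h) :: t

theorem pvLines_ne_nil (cs : List Char) : pvLines cs ≠ [] := by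
  cases cs with
  | nil => simp [pvLines]
  | cons c rest =>
      simp only [pvLines]
      split
      · simp
      · split <;> simp

theorem pvLines_no_newline (cs : List Char) (p : List Char) (hp : p ∈ pvLines cs) : '\n' ∉ p := by
  induction cs generalizing p with
  | nil => simp [pvLines] at hp; simp [hp]
  | cons c rest ih =>
      simp only [pvLines] at hp
      by_cases hc : c = '\n'
      · simp [hc] at hp
        rcases hp with h | h
        · simp [h]
        · exact ih p h
      · simp [hc] at hp
        rcases hpl : pvLines rest with _ | ⟨h0, t0⟩
        · exact absurd hpl (pvLines_ne_nil rest)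
        · rw [hpl] at hp
          simp at hp
          rcases hp with h | h
          · subst h
            have := ih h0 (by rw [hpl]; exact List.mem_cons_self)
            simp [this]
            exact fun hh => hc hh.symm
          · exact ih p (by rw [hpl]; exact List.mem_cons_of_mem _ h)

-- splitOn.go on the separator "\n" computes pvLines
theorem pvGo_splitOn (l : List Char) (fuel : Nat) (cur : List Char) (acc : List (List Char))
    (h : l.length ≤ fuel) :
    PySem.Chars.splitOn.go ['\n'] fuel l cur acc =
      acc.reverse ++ (match pvLines l with
        | [] => []
        | h0 :: t0 => (cur.reverse ++ h0) :: t0) := by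
  induction l generalizing fuel cur acc with
  | nil =>
      cases fuel <;> simp [PySem.Chars.splitOn.go, pvLines]
  | cons c rest ih =>
      cases fuel with
      | zero => simp at h
      | succ f =>
          rw [PySem.Chars.splitOn.go]
          by_cases hc : c = '\n'
          · subst hc
            simp only [List.isPrefixOf, BEq.rfl, Bool.true_and, List.isPrefixOf_nil_left,
              if_true, List.length_cons, List.length_nil, List.drop_succ_cons, List.drop_zero]
            rw [ih f [] (cur.reverse :: acc) (by simpa using h)]
            rcases hpl : pvLines rest with _ | ⟨h0, t0⟩
            · exact absurd hpl (pvLines_ne_nil rest)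
            · simp [pvLines, hpl]
          · have hpre : List.isPrefixOf ['\n'] (c :: rest) = false := by
              simp [List.isPrefixOf]
              intro hcc
              exact absurd hcc.symm hc
            simp only [hpre, Bool.false_eq_true, if_false]
            rw [ih f (c :: cur) acc (by simpa using Nat.le_of_succ_le_succ h)]
            rcases hpl : pvLines rest with _ | ⟨h0, t0⟩
            · exact absurd hpl (pvLines_ne_nil rest)
            · simp [pvLines, hc, hpl]

theorem pvSplitOn_newline (cs : List Char) :
    PySem.Chars.splitOn cs ['\n'] = pvLines cs := by
  unfold PySem.Chars.splitOn
  rw [pvGo_splitOn cs (cs.length + 1) [] [] (by omega)]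
  rcases hpl : pvLines cs with _ | ⟨h0, t0⟩
  · exact absurd hpl (pvLines_ne_nil cs)
  · simp

-- the text plus a trailing newline is the lines joined, each with its newline
theorem pvFlat_lines (cs : List Char) :
    cs ++ ['\n'] = (pvLines cs).flatMap (fun p => p ++ ['\n']) := by
  induction cs with
  | nil => simp [pvLines]
  | cons c rest ih =>
      by_cases hc : c = '\n'
      · subst hc; simp [pvLines, ih]
      · rcases hpl : pvLines rest with _ | ⟨h0, t0⟩
        · exact absurd hpl (pvLines_ne_nil rest)
        · simp only [pvLines, hc, if_false, hpl]
          rw [hpl] at ih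
          simp only [List.flatMap_cons] at ih ⊢
          simp [← ih]

-- the captured prefix for separator c after scanning l with buffered prefix pre
def pvUpd (c : Char) (pre l : List Char) : Option (List Char) → Option (List Char)
  | some p => some p
  | none => if c ∈ l then some (pre ++ l.takeWhile (· ≠ c)) else none

-- one scanned character moves the capture for separator c one step
theorem pvUpd_step (c x : Char) (pre l' : List Char) (p : Option (List Char)) :
    pvUpd c pre (x :: l') p =
      pvUpd c (pre ++ [x]) l' (if x = c ∧ p = none then some pre else p) := by
  cases p with
  | some q => simp [pvUpd]
  | none =>
      by_cases hx : x = c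
      · subst hx; simp [pvUpd, List.takeWhile_cons]
      · have hcx : ¬ c = x := fun hh => hx hh.symm
        simp [pvUpd, hx, hcx, List.takeWhile_cons]

-- scanning the chars of a newline-free line updates only the line state
theorem pvScanB (l : List Char) (h : '\n' ∉ l) (ds : pvD × pvD × pvD)
    (pre : List Char) (p1 p2 p3 : Option (List Char)) :
    l.foldl pvStepB (ds, (pre, p1, p2, p3)) =
      (ds, (pre ++ l, pvUpd ':' pre l p1, pvUpd '?' pre l p2, pvUpd '.' pre l p3)) := by
  induction l generalizing pre p1 p2 p3 with
  | nil => cases p1 <;> cases p2 <;> cases p3 <;> simp [pvUpd]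
  | cons x l' ih =>
      have hx : x ≠ '\n' := by intro hh; exact h (hh ▸ List.mem_cons_self)
      have h' : '\n' ∉ l' := fun hh => h (List.mem_cons_of_mem _ hh)
      simp only [List.foldl_cons, pvStepB, hx, if_false, reduceIte]
      rw [ih h', pvUpd_step ':' x pre l' p1, pvUpd_step '?' x pre l' p2,
        pvUpd_step '.' x pre l' p3]
      by_cases h1 : x = ':' ∧ p1 = none <;> by_cases h2 : x = '?' ∧ p2 = none <;>
        by_cases h3 : x = '.' ∧ p3 = none <;> simp [h1, h2, h3]

-- committing one newline-free line to the three dicts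
def pvKey (c : Char) (l : List Char) : String :=
  "\"" ++ String.ofList (l.takeWhile (· ≠ c)) ++ "\""

def pvIns (c : Char) (d : pvD) (l : List Char) : pvD :=
  if c ∈ l then d.insert (pvKey c l) none else d

def pvCommit (ds : pvD × pvD × pvD) (l : List Char) : pvD × pvD × pvD :=
  (pvIns ':' ds.1 l, pvIns '?' ds.2.1 l, pvIns '.' ds.2.2 l)

theorem pvLineB (l : List Char) (h : '\n' ∉ l) (ds : pvD × pvD × pvD) :
    (l ++ ['\n']).foldl pvStepB (ds, ([], none, none, none)) =
      (pvCommit ds l, ([], none, none, none)) := by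
  rw [List.foldl_append, pvScanB l h ds [] none none none]
  simp only [List.foldl_cons, List.foldl_nil, pvStepB, if_pos rfl]
  unfold pvCommit pvIns pvKey pvUpd
  by_cases h1 : ':' ∈ l <;> by_cases h2 : '?' ∈ l <;> by_cases h3 : '.' ∈ l <;>
    simp [h1, h2, h3]

theorem pvFoldLinesB (lines : List (List Char)) (h : ∀ p ∈ lines, '\n' ∉ p)
    (ds : pvD × pvD × pvD) :
    (lines.flatMap (fun p => p ++ ['\n'])).foldl pvStepB (ds, ([], none, none, none)) =
      (lines.foldl pvCommit ds, ([], none, none, none)) := by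
  induction lines generalizing ds with
  | nil => simp
  | cons l rest ih =>
      rw [List.flatMap_cons, List.foldl_append,
        pvLineB l (h l List.mem_cons_self) ds,
        ih (fun p hp => h p (List.mem_cons_of_mem _ hp))]
      simp

-- the triple fold splits into three independent folds
theorem pvCommit_foldl (lines : List (List Char)) (d1 d2 d3 : pvD) :
    lines.foldl pvCommit (d1, d2, d3) =
      (lines.foldl (pvIns ':') d1, lines.foldl (pvIns '?') d2, lines.foldl (pvIns '.') d3) := by
  induction lines generalizing d1 d2 d3 with
  | nil => rfl
  | cons l rest ih => simp only [List.foldl_cons, pvCommit]; rw [ih]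

-- ===== A-side characterisation =====

-- splitOnMax.go with zero splits left keeps the rest as one piece
theorem pvGoMax_zero (c : Char) (fuel : Nat) (l cur : List Char) (acc : List (List Char)) :
    PySem.Chars.splitOnMax.go [c] fuel 0 l cur acc = acc.reverse ++ [cur.reverse ++ l] := by
  cases fuel <;> cases l <;> simp [PySem.Chars.splitOnMax.go]

theorem pvGoMax_one (c : Char) (l : List Char) (fuel : Nat) (cur : List Char)
    (acc : List (List Char)) (h : l.length ≤ fuel) :
    PySem.Chars.splitOnMax.go [c] fuel 1 l cur acc =
      acc.reverse ++ (if c ∈ l then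
        [cur.reverse ++ l.takeWhile (· ≠ c), ((l.dropWhile (· ≠ c)).tail)]
      else [cur.reverse ++ l]) := by
  induction l generalizing fuel cur acc with
  | nil => cases fuel <;> simp [PySem.Chars.splitOnMax.go]
  | cons x rest ih =>
      cases fuel with
      | zero => simp at h
      | succ f =>
          rw [PySem.Chars.splitOnMax.go]
          by_cases hx : x = c
          · subst hx
            simp only [List.isPrefixOf, BEq.rfl, Bool.true_and, List.isPrefixOf_nil_left,
              if_pos rfl, reduceIte]
            rw [pvGoMax_zero]
            simp [List.takeWhile_cons, List.dropWhile_cons]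
          · have hpre : List.isPrefixOf [c] (x :: rest) = false := by
              simp [List.isPrefixOf]
              intro hcc
              exact absurd hcc.symm hx
            simp only [hpre, Bool.false_eq_true, if_false, reduceIte]
            rw [ih f (x :: cur) acc (by simpa using Nat.le_of_succ_le_succ h)]
            by_cases hm : c ∈ rest <;>
              simp [hm, hx, List.takeWhile_cons, List.dropWhile_cons, Ne.symm hx]

-- line.split(c, 1)[0] is the prefix before the first c, for a line containing c
theorem pvSplitHead_eq (c : Char) (sc : String) (hsc : sc.toList = [c])
    (p : List Char) (hp : c ∈ p) :
    pvSplitHead (String.ofList p) sc = String.ofList (p.takeWhile (· ≠ c)) := by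
  unfold pvSplitHead PySem.Str.splitMax?
  rw [String.toList_ofList, hsc]
  unfold PySem.Chars.splitMax?
  simp only [List.isEmpty_cons, Bool.false_eq_true, if_false]
  unfold PySem.Chars.splitOnMax
  simp only [show ¬ ((1 : Int) < 0) by omega, if_false, Int.toNat_one]
  rw [pvGoMax_one c p (p.length + 1) [] [] (by omega)]
  simp [hp]

theorem pvIsIn_eq (c : Char) (sc : String) (hsc : sc.toList = [c]) (p : List Char) :
    PySem.Str.isIn sc (String.ofList p) = decide (c ∈ p) := by
  rw [PySem.Str.isIn_eq, String.toList_ofList, hsc]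
  by_cases hp : c ∈ p
  · simp [hp, (PySem.Chars.isIn_iff_infix [c] p).2 ((List.singleton_infix_iff c p).2 hp)]
  · simp [hp, (PySem.Chars.isIn_eq_false_iff [c] p).2
      (fun hh => hp ((List.singleton_infix_iff c p).1 hh))]

-- A's per-separator pass over the lines is the conditional fold with pvIns
theorem pvA_scan (c : Char) (sc : String) (hsc : sc.toList = [c])
    (lines : List (List Char)) (d : pvD) :
    (((lines.map String.ofList).filter (fun l => PySem.Str.isIn sc l)).map
        (fun l => pvSplitHead l sc)).foldl
      (fun (d : pvD) k => d.insert ("\"" ++ k ++ "\"") none) d =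
      lines.foldl (pvIns c) d := by
  induction lines generalizing d with
  | nil => rfl
  | cons p rest ih =>
      simp only [List.map_cons, List.filter_cons]
      by_cases hp : c ∈ p
      · rw [if_pos (by rw [pvIsIn_eq c sc hsc]; simp [hp])]
        simp only [List.map_cons, List.foldl_cons]
        rw [pvSplitHead_eq c sc hsc p hp, ih]
        simp [pvIns, hp, pvKey]
      · rw [if_neg (by rw [pvIsIn_eq c sc hsc]; simp [hp])]
        rw [ih]
        simp [pvIns, hp]

-- ===== VERDICT (by name: the statement is the Claim_ definition above) =====
theorem filter_text_by_keywords_spec : Claim_equal_filter_text_by_keywords := by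
  intro t _
  show filter_text_by_keywords t = filter_text_by_keywords_alt t
  unfold filter_text_by_keywords filter_text_by_keywords_alt
  have hsplit : PySem.Str.split? t "\n" = some ((pvLines t.toList).map String.ofList) := by
    unfold PySem.Str.split? PySem.Chars.split?
    simp only [show ("\n" : String).toList = ['\n'] from rfl]
    simp [pvSplitOn_newline]
  rw [hsplit]
  simp only [Option.getD_some]
  rw [pvA_scan ':' ":" rfl (pvLines t.toList) PySem.Dict.empty,
      pvA_scan '?' "?" rfl (pvLines t.toList) PySem.Dict.empty,
      pvA_scan '.' "." rfl (pvLines t.toList) PySem.Dict.empty]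
  rw [pvFlat_lines t.toList,
      pvFoldLinesB (pvLines t.toList) (pvLines_no_newline t.toList) _,
      pvCommit_foldl]
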